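-- pv_equiv track=rewrite | github.com/DevOpsMadDog/Fixops | risk/reachability/proprietary_analyzer.py | _is_reachable_from_entries
-- ===== SOURCE A (Python) =====
-- from collections import deque
-- from typing import Any, Dict, List, Mapping, Optional, Set, Tuple
--
-- def _is_reachable_from_entries(
--     func_name: str, entry_points: List[str], graph: Dict[str, Any]
-- ) -> bool:
--     """Proprietary algorithm to check reachability from entry points."""
--     # BFS from entry points
--     visited = set()
--     queue = deque(entry_points)
--
--     while queue:
--         current = queue.popleft()
--         if current in visited:
--             continue
--         visited.add(current)
--
--         if current == func_name:
--             return True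
--
--         if current in graph:
--             callees = graph[current].get("callees", [])
--             queue.extend(callees)
--
--     return False
-- ===== SOURCE B (Python) =====
-- def _is_reachable_from_entries(func_name, entry_points, graph):
--     """Fixpoint saturation: sweep the whole reachable set adding callees until a pass adds nothing, then test membership."""
--     reachable = set(entry_points)
--     changed = True
--     while changed:
--         changed = False
--         for node in list(reachable):
--             if node in graph:
--                 for c in graph[node].get("callees", []):
--                     if c not in reachable:
--                         reachable.add(c)
--                         changed = True
--     return func_name in reachable
-- ===== Notes on version B (the rewrite author's own statement) =====
-- stated objective: alternative
-- what changed: The single-node BFS queue with early return is replaced by round-based fixpoint saturation: whole-set sweeps add every callee until a pass changes nothing, then membership of func_name is tested once at the end.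
import Mathlib
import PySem

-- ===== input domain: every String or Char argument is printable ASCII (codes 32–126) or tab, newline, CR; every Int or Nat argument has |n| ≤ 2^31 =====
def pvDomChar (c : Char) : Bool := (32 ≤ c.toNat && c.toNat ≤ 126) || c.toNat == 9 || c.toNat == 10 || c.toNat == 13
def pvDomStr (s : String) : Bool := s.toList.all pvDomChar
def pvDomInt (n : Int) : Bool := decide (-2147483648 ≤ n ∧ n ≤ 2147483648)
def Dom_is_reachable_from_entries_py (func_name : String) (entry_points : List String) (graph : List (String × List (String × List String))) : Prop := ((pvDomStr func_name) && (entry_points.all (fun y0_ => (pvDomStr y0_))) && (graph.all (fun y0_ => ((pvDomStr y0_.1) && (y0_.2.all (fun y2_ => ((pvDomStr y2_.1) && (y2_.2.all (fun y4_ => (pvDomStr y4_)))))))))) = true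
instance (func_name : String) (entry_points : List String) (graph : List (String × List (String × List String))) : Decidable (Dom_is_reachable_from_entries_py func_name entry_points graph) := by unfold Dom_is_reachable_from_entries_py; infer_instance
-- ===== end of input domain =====

-- B replaces A's single-node BFS queue (with early return) by round-based fixpoint
-- saturation of the reachable set followed by one membership test; same return value,
-- no speed claim.

-- ===== PORT A =====
-- Helpers used only for TERMINATION of the well-founded recursions (Python terminates
-- because the visited/reachable set can only grow within the finite universe of names;
-- pvUniv is that universe: the entry points plus every callee list in the graph).

def pvFlat (graph : List (String × List (String × List String))) : List String :=
  graph.flatMap (fun kv => kv.2.flatMap (fun e => e.2))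

def pvUniv (entry_points : List String) (graph : List (String × List (String × List String))) : List String :=
  entry_points ++ pvFlat graph

theorem pvPart_len {α β : Type} (l : List α) (f : α → List β) {a : α} (ha : a ∈ l) :
    (f a).length ≤ (l.flatMap f).length := by
  rw [List.length_flatMap]
  exact List.single_le_sum (by simp) _ (List.mem_map_of_mem ha)

theorem pvValue_mem {α β : Type} [BEq α] (l : List (α × β)) (k : α) (v : β)
    (h : (PySem.Dict.mk l).get? k = some v) : v ∈ l.map (·.2) := by
  simp only [PySem.Dict.get?, Option.map_eq_some_iff] at h
  obtain ⟨p, hp, hv⟩ := h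
  exact List.mem_map.mpr ⟨p, List.mem_of_find?_eq_some hp, hv⟩

theorem pvCallees_sub (graph : List (String × List (String × List String))) (n : String)
    (info : List (String × List String)) (hg : (PySem.Dict.mk graph).get? n = some info) :
    ∀ x ∈ (PySem.Dict.mk info).getD "callees" [], x ∈ pvFlat graph := by
  intro x hx
  rw [PySem.Dict.getD_eq_get?_getD] at hx
  cases h2 : (PySem.Dict.mk info).get? "callees" with
  | none => rw [h2] at hx; simp at hx
  | some cs =>
    rw [h2] at hx; simp only [Option.getD_some] at hx
    obtain ⟨e, he, hecs⟩ := List.mem_map.mp (pvValue_mem info "callees" cs h2)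
    obtain ⟨kv, hkv, hkvi⟩ := List.mem_map.mp (pvValue_mem graph n info hg)
    simp only [pvFlat, List.mem_flatMap]
    refine ⟨kv, hkv, e, ?_, ?_⟩
    · rw [hkvi]; exact he
    · show x ∈ e.2
      rw [hecs]; exact hx

theorem pvCallees_len (graph : List (String × List (String × List String))) (n : String)
    (info : List (String × List String)) (hg : (PySem.Dict.mk graph).get? n = some info) :
    ((PySem.Dict.mk info).getD "callees" []).length ≤ (pvFlat graph).length := by
  rw [PySem.Dict.getD_eq_get?_getD]
  cases h2 : (PySem.Dict.mk info).get? "callees" with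
  | none => simp
  | some cs =>
    simp only [Option.getD_some]
    obtain ⟨e, he, hecs⟩ := List.mem_map.mp (pvValue_mem info "callees" cs h2)
    obtain ⟨kv, hkv, hkvi⟩ := List.mem_map.mp (pvValue_mem graph n info hg)
    calc cs.length ≤ (info.flatMap (·.2)).length := by
            rw [← hecs]; exact pvPart_len info (·.2) he
      _ ≤ (pvFlat graph).length := by
            rw [← hkvi]; exact pvPart_len graph (fun kv => kv.2.flatMap (·.2)) hkv

theorem pvFilterMono {α : Type} {p q : α → Bool} (U : List α)
    (h : ∀ x, q x = true → p x = true) : (U.filter q).length ≤ (U.filter p).length := by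
  rw [← List.countP_eq_length_filter, ← List.countP_eq_length_filter]
  exact List.countP_mono_left (fun x _ => h x)

theorem pvFilterStrict {α : Type} {p q : α → Bool} (U : List α) (n : α) (hn : n ∈ U)
    (hpn : p n = true) (hqn : q n = false) (h : ∀ x, q x = true → p x = true) :
    (U.filter q).length < (U.filter p).length := by
  induction U with
  | nil => cases hn
  | cons a t ih =>
    rcases List.mem_cons.mp hn with rfl | hnt
    · simp only [List.filter_cons, hpn, hqn]
      exact Nat.lt_succ_of_le (pvFilterMono t h)
    · simp only [List.filter_cons]
      cases hqa : q a with
      | true =>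
        rw [h a hqa]
        simpa using ih hnt
      | false =>
        cases hpa : p a with
        | true => exact Nat.lt_succ_of_lt (ih hnt)
        | false => exact ih hnt

theorem pvContains_add_self (s : PySem.Set String) (x : String) :
    PySem.Set.contains (PySem.Set.add s x) x = true :=
  (PySem.Set.contains_iff _ _).mpr ((PySem.Set.mem_add s x x).mpr (Or.inr rfl))

theorem pvContains_add_mono (s : PySem.Set String) (x y : String)
    (h : PySem.Set.contains s y = true) : PySem.Set.contains (PySem.Set.add s x) y = true :=
  (PySem.Set.contains_iff _ _).mpr ((PySem.Set.mem_add s x y).mpr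
    (Or.inl ((PySem.Set.contains_iff _ _).mp h)))

theorem pvStrictAux (visited : PySem.Set String) (n : String) :
    ∀ x, (!PySem.Set.contains (PySem.Set.add visited n) x) = true
      → (!PySem.Set.contains visited x) = true := by
  intro x hx
  cases h : PySem.Set.contains visited x with
  | false => rw [Bool.not_eq_true']
  | true => rwa [pvContains_add_mono visited n x h] at hx

theorem pvUnvisDrop (U : List String) (visited : PySem.Set String) (n : String)
    (hn : n ∈ U) (hv : PySem.Set.contains visited n = false) :
    (U.filter (fun x => !PySem.Set.contains (PySem.Set.add visited n) x)).length + 1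
      ≤ (U.filter (fun x => !PySem.Set.contains visited x)).length :=
  pvFilterStrict U n hn
    (by show (!PySem.Set.contains visited n) = true; rw [Bool.not_eq_true']; exact hv)
    (by show (!PySem.Set.contains (PySem.Set.add visited n) n) = false
        rw [pvContains_add_self]; rfl)
    (pvStrictAux visited n)

-- Literal transliteration of A's BFS loop: pop from the front of `queue`, skip visited,
-- mark visited, return True on func_name, extend the queue with the callees of graph[current].
-- The Prop arguments record only that queue elements and callees stay inside pvUniv (termination).
def pvBfsA (func_name : String) (graph : List (String × List (String × List String)))
    (U : List String) (hflat : ∀ x ∈ pvFlat graph, x ∈ U) (hlen : (pvFlat graph).length ≤ U.length)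
    (visited : PySem.Set String) (queue : List String) (hq : ∀ x ∈ queue, x ∈ U) : Bool :=
  match queue with
  | [] => false
  | current :: rest =>
    if hv : PySem.Set.contains visited current = true then
      pvBfsA func_name graph U hflat hlen visited rest (fun x hx => hq x (List.mem_cons_of_mem _ hx))
    else
      let visited' := PySem.Set.add visited current
      if current == func_name then true
      else
        match hg : (PySem.Dict.mk graph).get? current with
        | some info =>
          pvBfsA func_name graph U hflat hlen visited'
            (rest ++ (PySem.Dict.mk info).getD "callees" [])
            (fun x hx => by
              rcases List.mem_append.mp hx with h | h
              · exact hq x (List.mem_cons_of_mem _ h)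
              · exact hflat x (pvCallees_sub graph current info hg x h))
        | none =>
          pvBfsA func_name graph U hflat hlen visited' rest
            (fun x hx => hq x (List.mem_cons_of_mem _ hx))
  termination_by (U.filter (fun x => !PySem.Set.contains visited x)).length * (U.length + 1) + queue.length
  decreasing_by
  · simp only [List.length_cons]; omega
  · have hv' : PySem.Set.contains visited current = false := Bool.eq_false_iff.mpr hv
    have hd := pvUnvisDrop U visited current (hq current List.mem_cons_self) hv'
    have h2 := Nat.mul_le_mul_right (U.length + 1) hd
    rw [Nat.add_mul, Nat.one_mul] at h2
    have hL := pvCallees_len graph current info hg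
    simp only [List.length_append, List.length_cons]
    omega
  · have hv' : PySem.Set.contains visited current = false := Bool.eq_false_iff.mpr hv
    have hd := pvUnvisDrop U visited current (hq current List.mem_cons_self) hv'
    have h2 := Nat.mul_le_mul_right (U.length + 1) hd
    rw [Nat.add_mul, Nat.one_mul] at h2
    simp only [List.length_cons]
    omega

def is_reachable_from_entries_py (func_name : String) (entry_points : List String)
    (graph : List (String × List (String × List String))) : Bool :=
  pvBfsA func_name graph (pvUniv entry_points graph)
    (fun x hx => List.mem_append.mpr (Or.inr hx))
    (by simp [pvUniv])
    PySem.Set.empty entry_points (fun x hx => List.mem_append.mpr (Or.inl hx))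

-- ===== PORT B =====
-- Literal transliteration of B's inner loop `for c in graph[node].get("callees", []): if c
-- not in reachable: reachable.add(c); changed = True`, the state (reachable, changed) threaded.
def pvSweepCallees (cs : List String) (st : PySem.Set String × Bool) : PySem.Set String × Bool :=
  match cs with
  | [] => st
  | c :: rest =>
    if PySem.Set.contains st.1 c then pvSweepCallees rest st
    else pvSweepCallees rest (PySem.Set.add st.1 c, true)

-- Transliteration of one full sweep `for node in list(reachable): if node in graph: …`.
def pvSweep (graph : List (String × List (String × List String)))
    (snap : List String) (st : PySem.Set String × Bool) : PySem.Set String × Bool :=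
  match snap with
  | [] => st
  | n :: rest =>
    match (PySem.Dict.mk graph).get? n with
    | some info => pvSweep graph rest (pvSweepCallees ((PySem.Dict.mk info).getD "callees" []) st)
    | none => pvSweep graph rest st

-- successors of a node: graph[n].get("callees", []) if n in graph else []
def pvSucc (graph : List (String × List (String × List String))) (n : String) : List String :=
  match (PySem.Dict.mk graph).get? n with
  | some info => (PySem.Dict.mk info).getD "callees" []
  | none => []

theorem pvSweepCallees_mem (cs : List String) (st : PySem.Set String × Bool) (x : String) :
    x ∈ (pvSweepCallees cs st).1 ↔ x ∈ st.1 ∨ x ∈ cs := by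
  fun_induction pvSweepCallees cs st with
  | case1 st => simp
  | case2 st c rest hc ih =>
    rw [ih]
    have hcm : c ∈ st.1 := (PySem.Set.contains_iff _ _).mp hc
    constructor
    · rintro (h | h)
      · exact Or.inl h
      · exact Or.inr (List.mem_cons_of_mem _ h)
    · rintro (h | h)
      · exact Or.inl h
      · rcases List.mem_cons.mp h with rfl | h
        · exact Or.inl hcm
        · exact Or.inr h
  | case3 st c rest hc ih =>
    rw [ih]
    rw [show (PySem.Set.add st.1 c, true).1 = PySem.Set.add st.1 c from rfl]
    rw [PySem.Set.mem_add]
    constructor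
    · rintro ((h | h) | h)
      · exact Or.inl h
      · exact Or.inr (List.mem_cons.mpr (Or.inl h))
      · exact Or.inr (List.mem_cons_of_mem _ h)
    · rintro (h | h)
      · exact Or.inl (Or.inl h)
      · rcases List.mem_cons.mp h with rfl | h
        · exact Or.inl (Or.inr rfl)
        · exact Or.inr h

theorem pvSweepCallees_noop (cs : List String) (st : PySem.Set String × Bool)
    (h : ∀ c ∈ cs, c ∈ st.1) : pvSweepCallees cs st = st := by
  induction cs with
  | nil => rfl
  | cons c rest ih =>
    unfold pvSweepCallees
    rw [if_pos ((PySem.Set.contains_iff _ _).mpr (h c List.mem_cons_self))]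
    exact ih (fun c hc => h c (List.mem_cons_of_mem _ hc))

theorem pvSweep_mem (graph : List (String × List (String × List String)))
    (snap : List String) (st : PySem.Set String × Bool) (x : String) :
    x ∈ (pvSweep graph snap st).1 ↔ x ∈ st.1 ∨ ∃ n ∈ snap, x ∈ pvSucc graph n := by
  fun_induction pvSweep graph snap st with
  | case1 st => simp
  | case2 st n rest info hg ih =>
    rw [ih, pvSweepCallees_mem]
    have hs : pvSucc graph n = (PySem.Dict.mk info).getD "callees" [] := by
      simp [pvSucc, hg]
    constructor
    · rintro ((h | h) | ⟨m, hm, hx⟩)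
      · exact Or.inl h
      · exact Or.inr ⟨n, List.mem_cons_self, by rw [hs]; exact h⟩
      · exact Or.inr ⟨m, List.mem_cons_of_mem _ hm, hx⟩
    · rintro (h | ⟨m, hm, hx⟩)
      · exact Or.inl (Or.inl h)
      · rcases List.mem_cons.mp hm with rfl | hm
        · exact Or.inl (Or.inr (by rw [← hs]; exact hx))
        · exact Or.inr ⟨m, hm, hx⟩
  | case3 st n rest hg ih =>
    rw [ih]
    have hs : pvSucc graph n = [] := by simp [pvSucc, hg]
    constructor
    · rintro (h | ⟨m, hm, hx⟩)
      · exact Or.inl h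
      · exact Or.inr ⟨m, List.mem_cons_of_mem _ hm, hx⟩
    · rintro (h | ⟨m, hm, hx⟩)
      · exact Or.inl h
      · rcases List.mem_cons.mp hm with rfl | hm
        · rw [hs] at hx; cases hx
        · exact Or.inr ⟨m, hm, hx⟩

theorem pvSweep_noop (graph : List (String × List (String × List String)))
    (snap : List String) (st : PySem.Set String × Bool)
    (h : ∀ n ∈ snap, ∀ x ∈ pvSucc graph n, x ∈ st.1) : pvSweep graph snap st = st := by
  fun_induction pvSweep graph snap st with
  | case1 _ => rfl
  | case2 st n rest info hg ih =>
    have hs : pvSucc graph n = (PySem.Dict.mk info).getD "callees" [] := by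
      simp [pvSucc, hg]
    have hcs : pvSweepCallees ((PySem.Dict.mk info).getD "callees" []) st = st :=
      pvSweepCallees_noop _ st (fun c hc => h n List.mem_cons_self c (by rw [hs]; exact hc))
    rw [hcs] at ih ⊢
    exact ih (fun m hm => h m (List.mem_cons_of_mem _ hm))
  | case3 st n rest hg ih => exact ih (fun m hm => h m (List.mem_cons_of_mem _ hm))

theorem pvSucc_flat (graph : List (String × List (String × List String))) (n x : String)
    (h : x ∈ pvSucc graph n) : x ∈ pvFlat graph := by
  unfold pvSucc at h
  cases hg : (PySem.Dict.mk graph).get? n with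
  | some info => rw [hg] at h; exact pvCallees_sub graph n info hg x h
  | none => rw [hg] at h; cases h

-- Transliteration of B's `while changed:` loop: one full sweep over the current reachable
-- set with the changed flag reset, repeated until the flag stays false. The Prop argument
-- records only that the reachable set stays inside pvUniv (termination).
def pvSaturate (graph : List (String × List (String × List String)))
    (U : List String) (hflat : ∀ x ∈ pvFlat graph, x ∈ U)
    (reach : PySem.Set String) (hr : ∀ x ∈ reach, x ∈ U) : PySem.Set String :=
  match hp : pvSweep graph reach (reach, false) with
  | (r', changed) =>
    if hc : changed = true then
      pvSaturate graph U hflat r' (fun x hx => by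
        have := (pvSweep_mem graph reach (reach, false) x).mp (by rw [hp]; exact hx)
        rcases this with h | ⟨n, _, hn⟩
        · exact hr x h
        · exact hflat x (pvSucc_flat graph n x hn))
    else r'
  termination_by (U.filter (fun x => !PySem.Set.contains reach x)).length
  decreasing_by
  · by_cases hall : ∀ n ∈ reach, ∀ x ∈ pvSucc graph n, x ∈ reach
    · exfalso
      have hnp := pvSweep_noop graph reach (reach, false) hall
      rw [hnp] at hp
      injection hp with _ h2
      exact absurd hc (by rw [← h2]; simp)
    · push_neg at hall
      obtain ⟨n, hn, x, hx, hxr⟩ := hall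
      have hxr' : x ∈ r' := by
        have : x ∈ (pvSweep graph reach (reach, false)).1 :=
          (pvSweep_mem graph reach (reach, false) x).mpr (Or.inr ⟨n, hn, hx⟩)
        rw [hp] at this; exact this
      have hsub : ∀ y, PySem.Set.contains r' y = false → PySem.Set.contains reach y = false := by
        intro y hy
        cases h : PySem.Set.contains reach y with
        | false => rfl
        | true =>
          have : y ∈ r' := by
            have : y ∈ (pvSweep graph reach (reach, false)).1 :=
              (pvSweep_mem graph reach (reach, false) y).mpr
                (Or.inl ((PySem.Set.contains_iff _ _).mp h))
            rw [hp] at this; exact this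
          rw [(PySem.Set.contains_iff _ _).mpr this] at hy; cases hy
      exact pvFilterStrict U x (hflat x (pvSucc_flat graph n x hx))
        (by show (!PySem.Set.contains reach x) = true
            rw [Bool.not_eq_true']
            cases h : PySem.Set.contains reach x with
            | false => rfl
            | true => exact absurd ((PySem.Set.contains_iff _ _).mp h) hxr)
        (by show (!PySem.Set.contains r' x) = false
            rw [(PySem.Set.contains_iff _ _).mpr hxr']; rfl)
        (by intro y hy
            rw [Bool.not_eq_true'] at hy ⊢
            exact hsub y hy)

def is_reachable_from_entries_py_alt (func_name : String) (entry_points : List String)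
    (graph : List (String × List (String × List String))) : Bool :=
  PySem.Set.contains
    (pvSaturate graph (pvUniv entry_points graph)
      (fun x hx => List.mem_append.mpr (Or.inr hx))
      (PySem.Set.ofList entry_points)
      (fun x hx => List.mem_append.mpr (Or.inl ((PySem.Set.mem_ofList _ _).mp hx))))
    func_name

-- ===== PRECONDITION & SPEC =====
def Spec_is_reachable_from_entries_py (func_name : String) (entry_points : List String) (graph : List (String × List (String × List String))) (out : Bool) : Prop := out = is_reachable_from_entries_py_alt func_name entry_points graph
instance (func_name : String) (entry_points : List String) (graph : List (String × List (String × List String))) (out : Bool) : Decidable (Spec_is_reachable_from_entries_py func_name entry_points graph out) := by unfold Spec_is_reachable_from_entries_py; infer_instance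

-- ===== CLAIM (what is proved, stated in full; the proofs are below) =====
def Claim_equal_is_reachable_from_entries_py : Prop := ∀ (func_name : String) (entry_points : List String) (graph : List (String × List (String × List String))), Dom_is_reachable_from_entries_py func_name entry_points graph → Spec_is_reachable_from_entries_py func_name entry_points graph (is_reachable_from_entries_py func_name entry_points graph)

-- ===== LEMMAS AND PROOFS =====

theorem pvSweepCallees_flag_mono (cs : List String) (st : PySem.Set String × Bool)
    (h : st.2 = true) : (pvSweepCallees cs st).2 = true := by
  fun_induction pvSweepCallees cs st with
  | case1 st => exact h
  | case2 st c rest hc ih => exact ih h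
  | case3 st c rest hc ih => exact ih rfl

theorem pvSweepCallees_flag_false (cs : List String) (st : PySem.Set String × Bool)
    (h : (pvSweepCallees cs st).2 = false) : pvSweepCallees cs st = st ∧ st.2 = false := by
  fun_induction pvSweepCallees cs st with
  | case1 st => exact ⟨rfl, h⟩
  | case2 st c rest hc ih => exact ih h
  | case3 st c rest hc ih =>
    exact absurd (pvSweepCallees_flag_mono rest _ rfl) (by rw [h]; simp)

theorem pvSweep_flag_false (graph : List (String × List (String × List String)))
    (snap : List String) (st : PySem.Set String × Bool)
    (h : (pvSweep graph snap st).2 = false) : pvSweep graph snap st = st ∧ st.2 = false := by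
  fun_induction pvSweep graph snap st with
  | case1 st => exact ⟨rfl, h⟩
  | case2 st n rest info hg ih =>
    obtain ⟨h1, h2⟩ := ih h
    obtain ⟨h3, h4⟩ := pvSweepCallees_flag_false _ st h2
    exact ⟨h1.trans h3, h4⟩
  | case3 st n rest hg ih => exact ih h


-- a call-graph path from a to c every node of which avoids the set v
inductive PVPath (graph : List (String × List (String × List String)))
    (v : List String) : String → String → Prop
  | refl (a : String) : a ∉ v → PVPath graph v a a
  | step (a b c : String) :
      a ∉ v → b ∈ pvSucc graph a → PVPath graph v b c → PVPath graph v a c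

theorem PVPath.not_mem {graph : List (String × List (String × List String))}
    {v : List String} {a c : String} (h : PVPath graph v a c) : a ∉ v := by
  cases h with
  | refl _ h => exact h
  | step _ _ _ h _ _ => exact h

theorem PVPath.mono {graph : List (String × List (String × List String))}
    {v w : List String} {a c : String} (h : PVPath graph w a c) (hvw : ∀ x ∈ v, x ∈ w) :
    PVPath graph v a c := by
  induction h with
  | refl a ha => exact PVPath.refl a (fun hx => ha (hvw a hx))
  | step a b c ha hb _ ih => exact PVPath.step a b c (fun hx => ha (hvw a hx)) hb ih

theorem PVPath.split {graph : List (String × List (String × List String))}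
    {v w : List String} {a t n : String} (h : PVPath graph v a t) (ht : t ≠ n)
    (hw : ∀ x, x ∈ w ↔ x ∈ v ∨ x = n) :
    PVPath graph w a t ∨ ∃ b ∈ pvSucc graph n, PVPath graph w b t := by
  induction h with
  | refl a ha =>
    exact Or.inl (PVPath.refl a (fun hx => by
      rcases (hw a).mp hx with h | h
      · exact ha h
      · exact ht h))
  | step a b c ha hb _ ih =>
    by_cases han : a = n
    · subst han
      rcases ih ht with h | h
      · exact Or.inr ⟨b, hb, h⟩
      · exact Or.inr h
    · rcases ih ht with h | h
      · exact Or.inl (PVPath.step a b c (fun hx => by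
          rcases (hw a).mp hx with h' | h'
          · exact ha h'
          · exact han h') hb h)
      · exact Or.inr h

theorem pvMem_add (s : PySem.Set String) (n x : String) :
    x ∈ PySem.Set.add s n ↔ x ∈ s ∨ x = n := PySem.Set.mem_add s n x

-- characterization of A's BFS loop
theorem pvBfsA_iff (func_name : String) (graph : List (String × List (String × List String)))
    (U : List String) (hflat : ∀ x ∈ pvFlat graph, x ∈ U) (hlen : (pvFlat graph).length ≤ U.length)
    (visited : PySem.Set String) (queue : List String) (hq : ∀ x ∈ queue, x ∈ U) :
    pvBfsA func_name graph U hflat hlen visited queue hq = true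
      ↔ ∃ q ∈ queue, PVPath graph visited q func_name := by
  fun_induction pvBfsA func_name graph U hflat hlen visited queue hq with
  | case1 visited hq1 hq2 => simp
  | case2 visited current rest hq1 hv hq2 ih =>
    rw [ih]
    constructor
    · rintro ⟨q, h1, h2⟩
      exact ⟨q, List.mem_cons_of_mem _ h1, h2⟩
    · rintro ⟨q, h1, h2⟩
      refine ⟨q, ?_, h2⟩
      rcases List.mem_cons.mp h1 with rfl | h
      · exact absurd ((PySem.Set.contains_iff visited q).mp hv) h2.not_mem
      · exact h
  | case3 visited current rest hq1 hv heq hq2 =>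
    obtain rfl : func_name = current := (beq_iff_eq.mp heq).symm
    simp only [true_iff]
    exact ⟨func_name, List.mem_cons_self,
      PVPath.refl func_name (fun hx => hv ((PySem.Set.contains_iff visited func_name).mpr hx))⟩
  | case4 visited current rest hq1 hv visited' hne info hg hq2 ih =>
    rw [ih]
    have hvmem : current ∉ visited := fun hx => hv ((PySem.Set.contains_iff visited current).mpr hx)
    have hfne : func_name ≠ current := fun h => hne (beq_iff_eq.mpr h.symm)
    have hsucc : pvSucc graph current = (PySem.Dict.mk info).getD "callees" [] := by
      simp [pvSucc, hg]
    have hvsub : ∀ x ∈ visited, x ∈ visited' :=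
      fun x hx => (pvMem_add visited current x).mpr (Or.inl hx)
    constructor
    · rintro ⟨q, h1, h2⟩
      rcases List.mem_append.mp h1 with h | h
      · exact ⟨q, List.mem_cons_of_mem _ h, h2.mono hvsub⟩
      · refine ⟨current, List.mem_cons_self,
          PVPath.step current q func_name hvmem ?_ (h2.mono hvsub)⟩
        rw [hsucc]; exact h
    · rintro ⟨q, h1, h2⟩
      rcases PVPath.split (w := visited') h2 hfne (fun x => pvMem_add visited current x)
        with h | ⟨b, hb1, hb2⟩
      · refine ⟨q, List.mem_append.mpr (Or.inl ?_), h⟩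
        rcases List.mem_cons.mp h1 with rfl | hr
        · exact absurd ((pvMem_add visited q q).mpr (Or.inr rfl)) h.not_mem
        · exact hr
      · rw [hsucc] at hb1
        exact ⟨b, List.mem_append.mpr (Or.inr hb1), hb2⟩
  | case5 visited current rest hq1 hv visited' hne hg hq2 ih =>
    rw [ih]
    have hfne : func_name ≠ current := fun h => hne (beq_iff_eq.mpr h.symm)
    have hsucc : pvSucc graph current = [] := by simp [pvSucc, hg]
    have hvsub : ∀ x ∈ visited, x ∈ visited' :=
      fun x hx => (pvMem_add visited current x).mpr (Or.inl hx)
    constructor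
    · rintro ⟨q, h1, h2⟩
      exact ⟨q, List.mem_cons_of_mem _ h1, h2.mono hvsub⟩
    · rintro ⟨q, h1, h2⟩
      rcases PVPath.split (w := visited') h2 hfne (fun x => pvMem_add visited current x)
        with h | ⟨b, hb1, hb2⟩
      · refine ⟨q, ?_, h⟩
        rcases List.mem_cons.mp h1 with rfl | hr
        · exact absurd ((pvMem_add visited q q).mpr (Or.inr rfl)) h.not_mem
        · exact hr
      · rw [hsucc] at hb1; cases hb1

-- on the empty avoid-set, PVPath composes
theorem pvPath_trans {graph : List (String × List (String × List String))} {a b c : String}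
    (h1 : PVPath graph PySem.Set.empty a b) (h2 : PVPath graph PySem.Set.empty b c) :
    PVPath graph PySem.Set.empty a c := by
  induction h1 with
  | refl a ha => exact h2
  | step a m b ha hm _ ih => exact PVPath.step a m c ha hm (ih h2)

-- the saturated set: contains the start set, is closed under pvSucc, and is sound
theorem pvSaturate_spec (graph : List (String × List (String × List String)))
    (U : List String) (hflat : ∀ x ∈ pvFlat graph, x ∈ U)
    (reach : PySem.Set String) (hr : ∀ x ∈ reach, x ∈ U) :
    (∀ x ∈ reach, x ∈ pvSaturate graph U hflat reach hr)
    ∧ (∀ n ∈ pvSaturate graph U hflat reach hr, ∀ x ∈ pvSucc graph n,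
        x ∈ pvSaturate graph U hflat reach hr)
    ∧ (∀ x ∈ pvSaturate graph U hflat reach hr,
        ∃ e ∈ reach, PVPath graph PySem.Set.empty e x) := by
  fun_induction pvSaturate graph U hflat reach hr with
  | case1 reach hr r' hp ih =>
    obtain ⟨ih1, ih2, ih3⟩ := ih
    have hmem : ∀ x, x ∈ r' ↔ x ∈ reach ∨ ∃ n ∈ reach, x ∈ pvSucc graph n := by
      intro x
      have h := pvSweep_mem graph reach (reach, false) x
      rw [hp] at h; exact h
    simp only [hp, dif_pos]
    refine ⟨?_, ih2, ?_⟩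
    · intro x hx
      exact ih1 x ((hmem x).mpr (Or.inl hx))
    · intro x hx
      obtain ⟨e', he', hpath⟩ := ih3 x hx
      rcases (hmem e').mp he' with h | ⟨n, hn, hs⟩
      · exact ⟨e', h, hpath⟩
      · exact ⟨n, hn, pvPath_trans
          (PVPath.step n e' e' List.not_mem_nil hs
            (PVPath.refl e' List.not_mem_nil)) hpath⟩
  | case2 reach hr r' changed hp hc =>
    have hflag : (pvSweep graph reach (reach, false)).2 = false := by
      rw [hp]
      exact Bool.not_eq_true changed ▸ (Bool.eq_false_iff.mpr hc)
    obtain ⟨heq, _⟩ := pvSweep_flag_false graph reach (reach, false) hflag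
    rw [hp] at heq
    have hr'eq : r' = reach := congrArg Prod.fst heq
    subst hr'eq
    simp only [hp]
    rw [dif_neg hc]
    refine ⟨fun x hx => hx, ?_, ?_⟩
    · intro n hn x hx
      have hmem : x ∈ (pvSweep graph r' (r', false)).1 :=
        (pvSweep_mem graph r' (r', false) x).mpr (Or.inr ⟨n, hn, hx⟩)
      rw [hp] at hmem; exact hmem
    · intro x hx
      exact ⟨x, hx, PVPath.refl x List.not_mem_nil⟩

-- a closed set absorbs paths
theorem pvClosed_path {graph : List (String × List (String × List String))}
    {R : PySem.Set String}
    (h2 : ∀ n ∈ R, ∀ x ∈ pvSucc graph n, x ∈ R)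
    {a c : String} (hp : PVPath graph PySem.Set.empty a c) (ha : a ∈ R) : c ∈ R := by
  induction hp with
  | refl a _ => exact ha
  | step a b c _ hb _ ih => exact ih (h2 a ha b hb)

-- characterization of B's saturation
theorem pvAlt_iff (func_name : String) (entry_points : List String)
    (graph : List (String × List (String × List String))) :
    is_reachable_from_entries_py_alt func_name entry_points graph = true
      ↔ ∃ q ∈ entry_points, PVPath graph PySem.Set.empty q func_name := by
  unfold is_reachable_from_entries_py_alt
  obtain ⟨h1, h2, h3⟩ := pvSaturate_spec graph (pvUniv entry_points graph)
    (fun x hx => List.mem_append.mpr (Or.inr hx))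
    (PySem.Set.ofList entry_points)
    (fun x hx => List.mem_append.mpr (Or.inl ((PySem.Set.mem_ofList _ _).mp hx)))
  rw [PySem.Set.contains_iff]
  constructor
  · intro h
    obtain ⟨e, he, hp⟩ := h3 func_name h
    exact ⟨e, (PySem.Set.mem_ofList _ _).mp he, hp⟩
  · rintro ⟨q, hq, hp⟩
    exact pvClosed_path h2 hp (h1 q ((PySem.Set.mem_ofList _ _).mpr hq))

theorem pv_main (func_name : String) (entry_points : List String)
    (graph : List (String × List (String × List String))) :
    is_reachable_from_entries_py func_name entry_points graph
      = is_reachable_from_entries_py_alt func_name entry_points graph := by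
  rw [Bool.eq_iff_iff]
  unfold is_reachable_from_entries_py
  rw [pvBfsA_iff, pvAlt_iff]

-- ===== VERDICT (by name: the statement is the Claim_ definition above) =====
theorem is_reachable_from_entries_py_spec : Claim_equal_is_reachable_from_entries_py := by
  intro func_name entry_points graph _
  exact pv_main func_name entry_points graph
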